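-- pv_equiv track=rewrite | github.com/albazzaztariq/UniLogic | XPile 3-17/Programs/sorted_list.py | sl_contains
-- ===== SOURCE A (Python) =====
-- def bisect_arr(arr, lo, hi, val):
--     while (lo < hi):
--         mid = ((lo + hi) // 2)
--         if (arr[mid] < val):
--             lo = (mid + 1)
--         else:
--             hi = mid
--     return lo
--
-- def sl_contains(data, sub_start, sub_len, sub_max, state, val):
--     num_subs = state[0]
--     if (num_subs == 0):
--         return False
--     pos = 0
--     for k in range(num_subs):
--         if (sub_max[k] < val):
--             pos = (k + 1)
--     if (pos == num_subs):
--         return False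
--     s_start = sub_start[pos]
--     s_len = sub_len[pos]
--     idx = bisect_arr(data, s_start, (s_start + s_len), val)
--     if (idx >= (s_start + s_len)):
--         return False
--     return (data[idx] == val)
-- ===== SOURCE B (Python) =====
-- def sl_contains(data, sub_start, sub_len, sub_max, state, val):
--     n = state[0]
--     if n <= 0:
--         return False
--     pos = sum(1 for x in sub_max[:n] if x < val)
--     if pos == n:
--         return False
--     s = sub_start[pos]
--     return val in data[s:s + sub_len[pos]]
-- ===== Notes on version B (the rewrite author's own statement) =====
-- stated objective: simpler
-- what changed: B replaces A's index-based linear scan (keeping the last k with sub_max[k] < val) and hand-written binary search with a count of sub_max[:n] entries below val and a plain membership test on the slice data[s:s+sub_len[pos]].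
-- outside the precondition, e.g. on sl_contains([0], [0], [1], [], [-1], 0): A returns True, B returns False; on sl_contains([8, 7, 7], [0, 0, 0], [1, 1, 1], [5, 9, 3], [3], 8): A returns False, B returns True; on sl_contains([5, 1], [0], [2], [9], [1], 1): A returns False, B returns True
import Mathlib
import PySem

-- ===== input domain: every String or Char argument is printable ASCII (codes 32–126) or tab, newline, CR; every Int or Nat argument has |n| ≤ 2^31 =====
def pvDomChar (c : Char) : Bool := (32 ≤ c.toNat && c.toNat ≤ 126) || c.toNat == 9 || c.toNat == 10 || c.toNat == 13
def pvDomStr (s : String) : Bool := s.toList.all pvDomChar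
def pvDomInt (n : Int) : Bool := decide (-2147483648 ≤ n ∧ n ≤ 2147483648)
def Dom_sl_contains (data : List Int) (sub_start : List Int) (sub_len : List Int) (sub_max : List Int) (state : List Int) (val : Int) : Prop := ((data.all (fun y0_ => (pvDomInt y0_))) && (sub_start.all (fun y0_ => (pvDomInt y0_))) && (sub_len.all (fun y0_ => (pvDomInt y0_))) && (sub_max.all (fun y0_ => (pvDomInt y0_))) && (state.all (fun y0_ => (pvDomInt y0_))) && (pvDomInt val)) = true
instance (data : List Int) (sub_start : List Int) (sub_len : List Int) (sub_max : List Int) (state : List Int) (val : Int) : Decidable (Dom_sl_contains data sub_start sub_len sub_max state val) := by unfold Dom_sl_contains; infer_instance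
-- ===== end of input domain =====

-- B replaces A's index-based linear scan + hand-written binary search with a count over the
-- sub_max prefix and a slice-membership test on the target sublist (alternative decomposition).

-- ===== PORT A =====
-- Python: bisect_arr(arr, lo, hi, val) — the while loop becomes recursion; the Nat fuel
-- (hi-lo).toNat only makes the loop total (it never runs out while lo < hi).
def bisectGo (arr : List Int) (val : Int) : Nat → Int → Int → Int
  | 0, lo, _ => lo
  | fuel + 1, lo, hi =>
    if lo < hi then
      let mid := PySem.Int.floordiv (lo + hi) 2
      if PySem.List.pyGetD arr mid 0 < val then bisectGo arr val fuel (mid + 1) hi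
      else bisectGo arr val fuel lo mid
    else lo

def bisectArr (arr : List Int) (lo hi val : Int) : Int :=
  bisectGo arr val (hi - lo).toNat lo hi

def sl_contains (data : List Int) (sub_start : List Int) (sub_len : List Int) (sub_max : List Int) (state : List Int) (val : Int) : Bool :=
  let num_subs := PySem.List.pyGetD state 0 0
  if num_subs == 0 then false
  else
    let pos := (PySem.List.pyRange 0 num_subs 1).foldl
      (fun pos k => if PySem.List.pyGetD sub_max k 0 < val then k + 1 else pos) 0
    if pos == num_subs then false
    else
      let s_start := PySem.List.pyGetD sub_start pos 0
      let s_len := PySem.List.pyGetD sub_len pos 0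
      let idx := bisectArr data s_start (s_start + s_len) val
      if s_start + s_len ≤ idx then false
      else PySem.List.pyGetD data idx 0 == val

-- ===== PORT B =====
-- Python Source B: count of sub_max[:n] entries below val (sum(1 for … if …) = countP),
-- then a membership test on the slice data[s:s+sub_len[pos]].
def sl_contains_alt (data : List Int) (sub_start : List Int) (sub_len : List Int) (sub_max : List Int) (state : List Int) (val : Int) : Bool :=
  let n := PySem.List.pyGetD state 0 0
  if n ≤ 0 then false
  else
    let pos : Int := ((PySem.List.slice sub_max none (some n)).countP (fun x => decide (x < val)) : Int)
    if pos == n then false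
    else
      let s := PySem.List.pyGetD sub_start pos 0
      (PySem.List.slice data (some s) (some (s + PySem.List.pyGetD sub_len pos 0))).contains val

-- ===== PRECONDITION & SPEC =====
-- pvPos_ is the number of scanned sub_max entries below val — the target sublist's position,
-- stated arithmetically, not by running either port; pvSeg_ is the selected data segment.
def pvPos_sl_contains (sub_max : List Int) (state : List Int) (val : Int) : Int :=
  (((sub_max.take state.headI.toNat).countP (fun x => decide (x < val))) : Int)

def pvSeg_sl_contains (data : List Int) (s l : Int) : List Int :=
  (data.drop s.toNat).take l.toNat

-- Pre_ is the natural domain of the sorted-list container plus every corner where the two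
-- values provably coincide anyway: state nonempty; num_subs = 0; num_subs < 0 (a degenerate
-- count: A silently searches sublist 0 — kept only where it returns False, as B does); or
-- num_subs > 0 with the scanned sub_max prefix existing and NONDECREASING (the container
-- invariant; on an unsorted prefix A's position is the accident of keeping the LAST k with
-- sub_max[k] < val, so such prefixes are kept only when the count is 0 or num_subs, where the
-- accident is harmless — cites), and, when a sublist is selected, its descriptor in range and
-- well-formed with the data segment NONDECREASING or val absent from it (A probes only O(log)
-- indices and compares one element, so on unsorted, negative-length or out-of-range segments
-- holding val its value is accidental — cites), or an empty Python slice for l ≤ 0.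
def Pre_sl_contains (data : List Int) (sub_start : List Int) (sub_len : List Int) (sub_max : List Int) (state : List Int) (val : Int) : Prop :=
  state ≠ [] ∧
  (state.headI = 0 ∨
   (state.headI < 0 ∧ sub_start ≠ [] ∧ sub_len ≠ [] ∧
     (sub_len[0]! ≤ 0 ∨
       (0 ≤ sub_start[0]! ∧ 0 ≤ sub_len[0]! ∧
        sub_start[0]! + sub_len[0]! ≤ (data.length : Int) ∧
        val ∉ pvSeg_sl_contains data sub_start[0]! sub_len[0]!))) ∨
   (0 < state.headI ∧ state.headI ≤ (sub_max.length : Int) ∧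
     ((∀ j : Nat, j < state.headI.toNat → ∀ i : Nat, i < j → sub_max[i]! ≤ sub_max[j]!) ∨
       pvPos_sl_contains sub_max state val = 0 ∨
       pvPos_sl_contains sub_max state val = state.headI) ∧
     (pvPos_sl_contains sub_max state val ≠ state.headI →
       pvPos_sl_contains sub_max state val < (sub_start.length : Int) ∧
       pvPos_sl_contains sub_max state val < (sub_len.length : Int) ∧
       ((0 ≤ sub_start[(pvPos_sl_contains sub_max state val).toNat]! ∧
         0 ≤ sub_len[(pvPos_sl_contains sub_max state val).toNat]! ∧
         sub_start[(pvPos_sl_contains sub_max state val).toNat]! +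
           sub_len[(pvPos_sl_contains sub_max state val).toNat]! ≤ (data.length : Int) ∧
         ((∀ j : Nat, j < (sub_start[(pvPos_sl_contains sub_max state val).toNat]! +
              sub_len[(pvPos_sl_contains sub_max state val).toNat]!).toNat →
            ∀ i : Nat, (sub_start[(pvPos_sl_contains sub_max state val).toNat]!).toNat ≤ i →
              i < j → data[i]! ≤ data[j]!) ∨
          val ∉ pvSeg_sl_contains data
            (sub_start[(pvPos_sl_contains sub_max state val).toNat]!)
            (sub_len[(pvPos_sl_contains sub_max state val).toNat]!))) ∨
        (sub_len[(pvPos_sl_contains sub_max state val).toNat]! ≤ 0 ∧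
         PySem.List.clampIdx data.length
             (sub_start[(pvPos_sl_contains sub_max state val).toNat]! +
              sub_len[(pvPos_sl_contains sub_max state val).toNat]!) ≤
           PySem.List.clampIdx data.length
             (sub_start[(pvPos_sl_contains sub_max state val).toNat]!))))))

instance (data : List Int) (sub_start : List Int) (sub_len : List Int) (sub_max : List Int) (state : List Int) (val : Int) : Decidable (Pre_sl_contains data sub_start sub_len sub_max state val) := by unfold Pre_sl_contains; infer_instance

def pvWitness_sl_contains : List Int × List Int × List Int × List Int × List Int × Int :=
  ([1, 3, 5, 7], [0, 2], [2, 2], [3, 7], [2], 5)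

def Spec_sl_contains (data : List Int) (sub_start : List Int) (sub_len : List Int) (sub_max : List Int) (state : List Int) (val : Int) (out : Bool) : Prop := out = sl_contains_alt data sub_start sub_len sub_max state val
instance (data : List Int) (sub_start : List Int) (sub_len : List Int) (sub_max : List Int) (state : List Int) (val : Int) (out : Bool) : Decidable (Spec_sl_contains data sub_start sub_len sub_max state val out) := by unfold Spec_sl_contains; infer_instance

-- ===== CLAIM (what is proved, stated in full; the proofs are below) =====
def Claim_equal_sl_contains : Prop := ∀ (data : List Int) (sub_start : List Int) (sub_len : List Int) (sub_max : List Int) (state : List Int) (val : Int), Dom_sl_contains data sub_start sub_len sub_max state val → Pre_sl_contains data sub_start sub_len sub_max state val → Spec_sl_contains data sub_start sub_len sub_max state val (sl_contains data sub_start sub_len sub_max state val)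

-- ===== LEMMAS AND PROOFS =====

theorem pyGetD_zero_headI (state : List Int) :
    PySem.List.pyGetD state 0 0 = state.headI := by
  cases state with
  | nil => simp [PySem.List.pyGetD, PySem.List.pyGet?]
  | cons a t => simp [PySem.List.pyGetD_zero_cons, List.headI]

-- a nonnegative in-range Python index is plain list indexing
theorem pyGetD_nonneg_getElem (xs : List Int) (p : Int) (h0 : 0 ≤ p) (hl : p < (xs.length : Int)) :
    PySem.List.pyGetD xs p 0 = xs[p.toNat]! := by
  conv_lhs => rw [show p = ((p.toNat : Nat) : Int) from (Int.toNat_of_nonneg h0).symm]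
  rw [PySem.List.pyGetD_natCast, List.getD_eq_getElem xs 0 (by omega),
    getElem!_pos xs p.toNat (by omega)]

-- A's linear scan over a NONDECREASING prefix computes the count of entries below val.
theorem scan_eq_count (arr : List Int) (val : Int) (m : Nat) (hm : m ≤ arr.length)
    (hmono : ∀ j : Nat, j < m → ∀ i : Nat, i < j → arr[i]! ≤ arr[j]!) :
    (PySem.List.pyRange 0 (m : Int) 1).foldl
      (fun pos k => if PySem.List.pyGetD arr k 0 < val then k + 1 else pos) 0
    = ((arr.take m).countP (fun x => decide (x < val)) : Int) := by
  induction m with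
  | zero =>
      rw [PySem.List.pyRange_one_eq_nil (by norm_num)]
      simp
  | succ m ih =>
      have hsplit : PySem.List.pyRange 0 ((m + 1 : Nat) : Int) 1
          = PySem.List.pyRange 0 (m : Int) 1 ++ [(m : Int)] := by
        push_cast
        exact PySem.List.pyRange_one_succ_right (by positivity)
      rw [hsplit, List.foldl_append, List.foldl_cons, List.foldl_nil,
        ih (by omega) (fun j hj i hi => hmono j (by omega) i hi)]
      have hmlt : m < arr.length := by omega
      have htake : arr.take (m + 1) = arr.take m ++ [arr[m]] := by
        rw [List.take_add_one, List.getElem?_eq_getElem hmlt]; rfl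
      have hget : PySem.List.pyGetD arr (m : Int) 0 = arr[m] := by
        rw [PySem.List.pyGetD_natCast, List.getD_eq_getElem arr 0 hmlt]
      have hlen : (arr.take m).length = m := by rw [List.length_take]; omega
      rw [htake, List.countP_append, hget]
      by_cases hc : arr[m] < val
      · rw [if_pos hc]
        have hall : (arr.take m).countP (fun x => decide (x < val)) = (arr.take m).length := by
          rw [List.countP_eq_length]
          intro x hx
          obtain ⟨i, hi, rfl⟩ := List.getElem_of_mem hx
          have hi' : i < m := by rw [hlen] at hi; exact hi
          rw [List.getElem_take]
          simp only [decide_eq_true_eq]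
          have hle := hmono m (Nat.lt_succ_self m) i hi'
          rw [getElem!_pos arr i (by omega), getElem!_pos arr m hmlt] at hle
          omega
        rw [hall, hlen]
        simp [hc]
      · rw [if_neg hc]
        simp [hc]

-- A's scan when NO scanned entry is below val: the accumulator is never touched.
theorem scan_eq_zero (arr : List Int) (val : Int) (m : Nat) (hm : m ≤ arr.length)
    (hno : ∀ i : Nat, i < m → ¬ arr[i]! < val) :
    (PySem.List.pyRange 0 (m : Int) 1).foldl
      (fun pos k => if PySem.List.pyGetD arr k 0 < val then k + 1 else pos) 0 = 0 := by
  induction m with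
  | zero =>
      rw [PySem.List.pyRange_one_eq_nil (by norm_num)]
      rfl
  | succ m ih =>
      have hsplit : PySem.List.pyRange 0 ((m + 1 : Nat) : Int) 1
          = PySem.List.pyRange 0 (m : Int) 1 ++ [(m : Int)] := by
        push_cast
        exact PySem.List.pyRange_one_succ_right (by positivity)
      rw [hsplit, List.foldl_append, List.foldl_cons, List.foldl_nil,
        ih (by omega) (fun i hi => hno i (by omega))]
      have hmlt : m < arr.length := by omega
      have hget : PySem.List.pyGetD arr (m : Int) 0 = arr[m]! := by
        rw [PySem.List.pyGetD_natCast, List.getD_eq_getElem arr 0 hmlt,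
          getElem!_pos arr m hmlt]
      rw [hget, if_neg (hno m (Nat.lt_succ_self m))]

-- A's scan when EVERY scanned entry is below val: the last step writes m.
theorem scan_eq_all (arr : List Int) (val : Int) (m : Nat) (hm : m ≤ arr.length)
    (hall : ∀ i : Nat, i < m → arr[i]! < val) :
    (PySem.List.pyRange 0 (m : Int) 1).foldl
      (fun pos k => if PySem.List.pyGetD arr k 0 < val then k + 1 else pos) 0 = (m : Int) := by
  cases m with
  | zero =>
      rw [PySem.List.pyRange_one_eq_nil (by norm_num)]
      rfl
  | succ m =>
      have hsplit : PySem.List.pyRange 0 ((m + 1 : Nat) : Int) 1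
          = PySem.List.pyRange 0 (m : Int) 1 ++ [(m : Int)] := by
        push_cast
        exact PySem.List.pyRange_one_succ_right (by positivity)
      rw [hsplit, List.foldl_append, List.foldl_cons, List.foldl_nil]
      have hmlt : m < arr.length := by omega
      have hget : PySem.List.pyGetD arr (m : Int) 0 = arr[m]! := by
        rw [PySem.List.pyGetD_natCast, List.getD_eq_getElem arr 0 hmlt,
          getElem!_pos arr m hmlt]
      rw [hget, if_pos (hall m (Nat.lt_succ_self m))]
      push_cast
      ring

-- The characterization of A's hand-written binary search on a sorted probed range.
theorem bisectGo_spec (arr : List Int) (val : Int) (fuel : Nat) :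
    ∀ lo hi : Int, (hi - lo).toNat ≤ fuel → lo ≤ hi →
    (∀ i j : Int, lo ≤ i → i ≤ j → j < hi →
      PySem.List.pyGetD arr i 0 ≤ PySem.List.pyGetD arr j 0) →
    lo ≤ bisectGo arr val fuel lo hi ∧ bisectGo arr val fuel lo hi ≤ hi ∧
    (∀ k : Int, lo ≤ k → k < bisectGo arr val fuel lo hi → PySem.List.pyGetD arr k 0 < val) ∧
    (∀ k : Int, bisectGo arr val fuel lo hi ≤ k → k < hi → val ≤ PySem.List.pyGetD arr k 0) := by
  induction fuel with
  | zero =>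
      intro lo hi hfuel hle hmono
      have heq : lo = hi := by omega
      subst heq
      simp only [bisectGo]
      exact ⟨le_refl lo, le_refl lo, fun k hk1 hk2 => by omega, fun k hk1 hk2 => by omega⟩
  | succ fuel ih =>
      intro lo hi hfuel hle hmono
      simp only [bisectGo]
      by_cases h : lo < hi
      · rw [if_pos h]
        have hmid : lo ≤ PySem.Int.floordiv (lo + hi) 2 ∧ PySem.Int.floordiv (lo + hi) 2 < hi := by
          rw [PySem.Int.floordiv_eq_ediv_of_pos (by norm_num : (0:Int) < 2)]
          omega
        set mid := PySem.Int.floordiv (lo + hi) 2 with hmiddef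
        by_cases hc : PySem.List.pyGetD arr mid 0 < val
        · rw [if_pos hc]
          obtain ⟨h1, h2, h3, h4⟩ := ih (mid + 1) hi (by omega) (by omega)
            (fun i j hi' hij hj => hmono i j (by omega) hij hj)
          refine ⟨by omega, h2, ?_, h4⟩
          intro k hk1 hk2
          by_cases hkm : k ≤ mid
          · exact lt_of_le_of_lt (hmono k mid hk1 hkm hmid.2) hc
          · exact h3 k (by omega) hk2
        · rw [if_neg hc]
          obtain ⟨h1, h2, h3, h4⟩ := ih lo mid (by omega) hmid.1
            (fun i j hi' hij hj => hmono i j hi' hij (by omega))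
          refine ⟨h1, by omega, h3, ?_⟩
          intro k hk1 hk2
          by_cases hkm : mid ≤ k
          · exact le_trans (not_lt.mp hc) (hmono mid k hmid.1 hkm hk2)
          · exact h4 k hk1 (by omega)
      · rw [if_neg h]
        exact ⟨le_refl lo, hle, fun k hk1 hk2 => absurd hk1 (by omega),
          fun k hk1 hk2 => absurd hk2 (by omega)⟩

theorem bisectArr_spec (arr : List Int) (val : Int) (lo hi : Int) (hle : lo ≤ hi)
    (hmono : ∀ i j : Int, lo ≤ i → i ≤ j → j < hi →
      PySem.List.pyGetD arr i 0 ≤ PySem.List.pyGetD arr j 0) :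
    lo ≤ bisectArr arr lo hi val ∧ bisectArr arr lo hi val ≤ hi ∧
    (∀ k : Int, lo ≤ k → k < bisectArr arr lo hi val → PySem.List.pyGetD arr k 0 < val) ∧
    (∀ k : Int, bisectArr arr lo hi val ≤ k → k < hi → val ≤ PySem.List.pyGetD arr k 0) := by
  unfold bisectArr
  exact bisectGo_spec arr val (hi - lo).toNat lo hi (le_refl _) hle hmono

-- On ANY probed range (sorted or not) the search never leaves [lo, hi].
theorem bisectGo_bounds (arr : List Int) (val : Int) (fuel : Nat) :
    ∀ lo hi : Int, lo ≤ hi →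
    lo ≤ bisectGo arr val fuel lo hi ∧ bisectGo arr val fuel lo hi ≤ hi := by
  induction fuel with
  | zero => intro lo hi hle; exact ⟨le_refl lo, hle⟩
  | succ fuel ih =>
      intro lo hi hle
      simp only [bisectGo]
      by_cases h : lo < hi
      · rw [if_pos h]
        have hmid : lo ≤ PySem.Int.floordiv (lo + hi) 2 ∧ PySem.Int.floordiv (lo + hi) 2 < hi := by
          rw [PySem.Int.floordiv_eq_ediv_of_pos (by norm_num : (0:Int) < 2)]
          omega
        set mid := PySem.Int.floordiv (lo + hi) 2
        by_cases hc : PySem.List.pyGetD arr mid 0 < val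
        · rw [if_pos hc]
          have := ih (mid + 1) hi (by omega)
          exact ⟨by omega, this.2⟩
        · rw [if_neg hc]
          have := ih lo mid (by omega)
          exact ⟨this.1, by omega⟩
      · rw [if_neg h]
        exact ⟨le_refl lo, hle⟩

-- an in-range probed element belongs to the segment
theorem pyGetD_mem_seg (data : List Int) (s l k : Int) (hs : 0 ≤ s)
    (hse : s + l ≤ (data.length : Int)) (hk1 : s ≤ k) (hk2 : k < s + l) :
    PySem.List.pyGetD data k 0 ∈ pvSeg_sl_contains data s l := by
  have hklen : k.toNat < data.length := by omega
  rw [pyGetD_nonneg_getElem data k (by omega) (by omega), getElem!_pos data k.toNat hklen]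
  have hkk : k.toNat - s.toNat < (pvSeg_sl_contains data s l).length := by
    simp only [pvSeg_sl_contains, List.length_take, List.length_drop]
    omega
  have hvk : (pvSeg_sl_contains data s l)[k.toNat - s.toNat] = data[k.toNat] := by
    simp only [pvSeg_sl_contains]
    rw [List.getElem_take, List.getElem_drop]
    congr 1
    omega
  rw [← hvk]
  exact List.getElem_mem hkk

-- A's tail (binary search + one comparison) returns false when val is absent from a
-- well-bounded segment, sorted or not.
theorem tailA_false_of_not_mem (data : List Int) (s l val : Int) (hs : 0 ≤ s) (hl : 0 ≤ l)
    (hse : s + l ≤ (data.length : Int)) (hnot : val ∉ pvSeg_sl_contains data s l) :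
    (if s + l ≤ bisectArr data s (s + l) val then false
     else (PySem.List.pyGetD data (bisectArr data s (s + l) val) 0 == val)) = false := by
  obtain ⟨h1, h2⟩ := bisectGo_bounds data val (s + l - s).toNat s (s + l) (by omega)
  set idx := bisectArr data s (s + l) val with hidx
  by_cases hge : s + l ≤ idx
  · rw [if_pos hge]
  · rw [if_neg hge, beq_eq_false_iff_ne]
    intro hv
    exact hnot (hv ▸ pyGetD_mem_seg data s l idx hs hse h1 (by omega))

-- ===== VERDICT (by name: the statement is the Claim_ definition above) =====
theorem sl_contains_spec : Claim_equal_sl_contains := by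
  intro data sub_start sub_len sub_max state val _hDom hPre
  obtain ⟨hne, hcase⟩ := hPre
  unfold Spec_sl_contains
  simp only [sl_contains, sl_contains_alt, pyGetD_zero_headI, beq_iff_eq]
  rcases hcase with h0 | ⟨hneg, hss, hsl, hseg0⟩ | ⟨hn, hlen, hpref, hsel⟩
  · rw [if_pos h0, if_pos (by omega : state.headI ≤ 0)]
  · -- num_subs < 0: A scans nothing, picks sublist 0 and returns False; B returns False
    rw [if_neg (by omega : ¬ state.headI = 0), if_pos (by omega : state.headI ≤ 0),
      PySem.List.pyRange_one_eq_nil (by omega : state.headI ≤ 0)]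
    simp only [List.foldl_nil]
    rw [if_neg (by omega : ¬ (0 : Int) = state.headI)]
    have hgs : PySem.List.pyGetD sub_start 0 0 = sub_start[0]! := by
      rw [pyGetD_nonneg_getElem sub_start 0 le_rfl (by cases sub_start <;> simp_all)]
      norm_num
    have hgl : PySem.List.pyGetD sub_len 0 0 = sub_len[0]! := by
      rw [pyGetD_nonneg_getElem sub_len 0 le_rfl (by cases sub_len <;> simp_all)]
      norm_num
    rw [hgs, hgl]
    set s := sub_start[0]! with hsdef
    set l := sub_len[0]! with hldef
    rcases hseg0 with hl0 | ⟨hs0, hl0, hse, hnot⟩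
    · have hidx : bisectArr data s (s + l) val = s := by
        unfold bisectArr
        have h : (s + l - s).toNat = 0 := by omega
        rw [h]; rfl
      rw [hidx, if_pos (by omega : s + l ≤ s)]
    · exact tailA_false_of_not_mem data s l val hs0 hl0 hse hnot
  · -- num_subs > 0
    rw [if_neg (by omega : ¬ state.headI = 0), if_neg (by omega : ¬ state.headI ≤ 0)]
    have hsliceB : PySem.List.slice sub_max none (some state.headI)
        = sub_max.take state.headI.toNat := PySem.List.slice_to sub_max (by omega)
    have hposeq : (PySem.List.pyRange 0 state.headI 1).foldl
        (fun pos k => if PySem.List.pyGetD sub_max k 0 < val then k + 1 else pos) 0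
        = pvPos_sl_contains sub_max state val := by
      rcases hpref with hsorted | hz | ha
      · have h := scan_eq_count sub_max val state.headI.toNat (by omega) hsorted
        rw [Int.toNat_of_nonneg (by omega : (0:Int) ≤ state.headI)] at h
        unfold pvPos_sl_contains
        exact h
      · -- count 0: no scanned entry is below val
        have hno : ∀ i : Nat, i < state.headI.toNat → ¬ sub_max[i]! < val := by
          intro i hi hlt
          have hcz : (sub_max.take state.headI.toNat).countP (fun x => decide (x < val)) = 0 := by
            unfold pvPos_sl_contains at hz; omega
          rw [List.countP_eq_zero] at hcz
          have hmem : sub_max[i]! ∈ sub_max.take state.headI.toNat := by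
            rw [getElem!_pos sub_max i (by omega)]
            have : (sub_max.take state.headI.toNat)[i]'(by simp [List.length_take]; omega)
                = sub_max[i] := List.getElem_take
            rw [← this]
            exact List.getElem_mem _
          have := hcz _ hmem
          simp only [decide_eq_true_eq] at this
          omega
        have h := scan_eq_zero sub_max val state.headI.toNat (by omega) hno
        rw [Int.toNat_of_nonneg (by omega : (0:Int) ≤ state.headI)] at h
        rw [h, hz]
      · -- count = num_subs: every scanned entry is below val
        have hlen' : (sub_max.take state.headI.toNat).length = state.headI.toNat := by
          rw [List.length_take]; omega
        have hcall : (sub_max.take state.headI.toNat).countP (fun x => decide (x < val))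
            = (sub_max.take state.headI.toNat).length := by
          unfold pvPos_sl_contains at ha; omega
        rw [List.countP_eq_length] at hcall
        have hall : ∀ i : Nat, i < state.headI.toNat → sub_max[i]! < val := by
          intro i hi
          have hmem : sub_max[i] ∈ sub_max.take state.headI.toNat := by
            have : (sub_max.take state.headI.toNat)[i]'(by omega) = sub_max[i] :=
              List.getElem_take
            rw [← this]
            exact List.getElem_mem _
          have := hcall _ hmem
          simp only [decide_eq_true_eq] at this
          rw [getElem!_pos sub_max i (by omega)]
          exact this
        have h := scan_eq_all sub_max val state.headI.toNat (by omega) hall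
        rw [Int.toNat_of_nonneg (by omega : (0:Int) ≤ state.headI)] at h
        rw [h, ha]
    rw [hposeq, hsliceB,
      show ((List.countP (fun x => decide (x < val)) (List.take state.headI.toNat sub_max) : Nat) : Int)
        = pvPos_sl_contains sub_max state val from rfl]
    show (if pvPos_sl_contains sub_max state val = state.headI then false else _)
        = (if pvPos_sl_contains sub_max state val = state.headI then false else _)
    by_cases hpn : pvPos_sl_contains sub_max state val = state.headI
    · rw [if_pos hpn, if_pos hpn]
    rw [if_neg hpn, if_neg hpn]
    obtain ⟨hps, hpl, hsegc⟩ := hsel hpn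
    set p := pvPos_sl_contains sub_max state val with hpdef
    have hp0 : 0 ≤ p := by unfold pvPos_sl_contains at hpdef; omega
    rw [pyGetD_nonneg_getElem sub_start p hp0 hps, pyGetD_nonneg_getElem sub_len p hp0 hpl]
    set s := sub_start[p.toNat]! with hsdef
    set l := sub_len[p.toNat]! with hldef
    rcases hsegc with ⟨hs0, hl0, hse, hsd⟩ | ⟨hl0, hclamp⟩
    · -- well-formed descriptor: B's slice IS the segment
      have hsl' : PySem.List.slice data (some s) (some (s + l)) = pvSeg_sl_contains data s l := by
        rw [PySem.List.slice_toNat data hs0 (by omega)]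
        unfold pvSeg_sl_contains
        congr 1
        omega
      rcases hsd with hsegmono | hnot
      · -- sorted segment: binary-search hit iff membership
        have hmono : ∀ i j : Int, s ≤ i → i ≤ j → j < s + l →
            PySem.List.pyGetD data i 0 ≤ PySem.List.pyGetD data j 0 := by
          intro i j h1 h2 h3
          have hi0 : 0 ≤ i := le_trans hs0 h1
          rw [pyGetD_nonneg_getElem data i hi0 (by omega),
            pyGetD_nonneg_getElem data j (by omega) (by omega)]
          rcases eq_or_lt_of_le h2 with heq | hlt
          · rw [heq]
          · exact hsegmono j.toNat (by omega) i.toNat (by omega) (by omega)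
        obtain ⟨hB1, hB2, hB3, hB4⟩ := bisectArr_spec data val s (s + l) (by omega) hmono
        set idx := bisectArr data s (s + l) val with hidxdef
        have hmem : (PySem.List.slice data (some s) (some (s + l))).contains val = true
            ↔ ∃ j : Int, s ≤ j ∧ j < s + l ∧ PySem.List.pyGetD data j 0 = val := by
          rw [hsl', List.contains_iff_mem]
          constructor
          · intro hv
            obtain ⟨k, hk, hvk⟩ := List.getElem_of_mem hv
            have hk' : s.toNat + k < (s + l).toNat ∧ s.toNat + k < data.length := by
              simp only [pvSeg_sl_contains, List.length_take, List.length_drop] at hk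
              omega
            refine ⟨s + (k : Int), by omega, by omega, ?_⟩
            rw [show s + (k : Int) = ((s.toNat + k : Nat) : Int) by omega,
              PySem.List.pyGetD_natCast, List.getD_eq_getElem data 0 hk'.2]
            simp only [pvSeg_sl_contains] at hvk
            rw [List.getElem_take, List.getElem_drop] at hvk
            exact hvk
          · rintro ⟨j, hj1, hj2, hjv⟩
            rw [← hjv]
            exact pyGetD_mem_seg data s l j hs0 hse hj1 hj2
        by_cases hcv : ∃ j : Int, s ≤ j ∧ j < s + l ∧ PySem.List.pyGetD data j 0 = val
        · have hB : (PySem.List.slice data (some s) (some (s + l))).contains val = true :=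
            hmem.mpr hcv
          obtain ⟨j, hj1, hj2, hjv⟩ := hcv
          have hjidx : idx ≤ j := by
            by_contra hlt
            have := hB3 j hj1 (by omega)
            omega
          have hidxlt : idx < s + l := by omega
          have hA1 : val ≤ PySem.List.pyGetD data idx 0 := hB4 idx (le_refl idx) hidxlt
          have hA2 : PySem.List.pyGetD data idx 0 ≤ PySem.List.pyGetD data j 0 :=
            hmono idx j hB1 hjidx hj2
          rw [if_neg (by omega : ¬ s + l ≤ idx), hB, beq_iff_eq]
          omega
        · have hB : (PySem.List.slice data (some s) (some (s + l))).contains val = false := by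
            rw [← Bool.not_eq_true, hmem]
            exact fun h => hcv h
          rw [hB]
          by_cases hge : s + l ≤ idx
          · rw [if_pos hge]
          · rw [if_neg hge, beq_eq_false_iff_ne]
            intro hv
            exact hcv ⟨idx, hB1, by omega, hv⟩
      · -- val absent from the segment: both sides are false
        have hA := tailA_false_of_not_mem data s l val hs0 hl0 hse hnot
        have hB : (PySem.List.slice data (some s) (some (s + l))).contains val = false := by
          rw [← Bool.not_eq_true, hsl', List.contains_iff_mem]
          exact hnot
        rw [hB]
        exact hA
    · -- l ≤ 0 with an empty Python slice: A's loop never runs, B's slice is []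
      have hidx : bisectArr data s (s + l) val = s := by
        unfold bisectArr
        have h : (s + l - s).toNat = 0 := by omega
        rw [h]; rfl
      have hB : PySem.List.slice data (some s) (some (s + l)) = [] := by
        apply List.eq_nil_of_length_eq_zero
        rw [PySem.List.length_slice]
        omega
      rw [hidx, if_pos (by omega : s + l ≤ s), hB]
      rfl
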